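-- pv_equiv track=rewrite | github.com/tnn1t1s/golars | benchmarks/join/polars_micro.py | build_string_pairs
-- ===== SOURCE A (Python) =====
-- class LCG:
--     def __init__(self, seed: int) -> None:
--         self.state = seed & 0xFFFFFFFF
--
--     def next(self) -> int:
--         self.state = (self.state * 1664525 + 1013904223) & 0xFFFFFFFF
--         return self.state
--
-- def build_string_pairs(rows: int, groups: int, seed_a: int, seed_b: int):
--     rng_a = LCG(seed_a)
--     rng_b = LCG(seed_b)
--     keys_a = [""] * rows
--     keys_b = [""] * rows
--     values = [0] * rows
--     for i in range(rows):
--         keys_a[i] = f"k{rng_a.next() % groups:04d}"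
--         keys_b[i] = f"k{rng_b.next() % groups:04d}"
--         values[i] = rng_a.next()
--     return keys_a, keys_b, values
-- ===== SOURCE B (Python) =====
-- def build_string_pairs(rows: int, groups: int, seed_a: int, seed_b: int):
--     # Generate both LCG streams first, then format in separate passes.
--     mask = 0xFFFFFFFF
--     n = max(rows, 0)
--     states_a = []
--     s = seed_a & mask
--     for _ in range(2 * n):
--         s = (s * 1664525 + 1013904223) & mask
--         states_a.append(s)
--     states_b = []
--     s = seed_b & mask
--     for _ in range(n):
--         s = (s * 1664525 + 1013904223) & mask
--         states_b.append(s)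
--     keys_a = [f"k{st % groups:04d}" for st in states_a[0::2]]
--     values = states_a[1::2]
--     keys_b = [f"k{st % groups:04d}" for st in states_b]
--     return keys_a, keys_b, values
-- ===== Notes on version B (the rewrite author's own statement) =====
-- stated objective: alternative
-- what changed: B separates LCG stream generation (two plain state loops producing 2*rows and rows states) from key formatting, which becomes map/slice passes over the precomputed state lists, instead of A's single interleaved per-row loop.
-- outside the precondition, e.g. on build_string_pairs(1, 0, 5, 5): A raises ZeroDivisionError, B raises ZeroDivisionError
import Mathlib
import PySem

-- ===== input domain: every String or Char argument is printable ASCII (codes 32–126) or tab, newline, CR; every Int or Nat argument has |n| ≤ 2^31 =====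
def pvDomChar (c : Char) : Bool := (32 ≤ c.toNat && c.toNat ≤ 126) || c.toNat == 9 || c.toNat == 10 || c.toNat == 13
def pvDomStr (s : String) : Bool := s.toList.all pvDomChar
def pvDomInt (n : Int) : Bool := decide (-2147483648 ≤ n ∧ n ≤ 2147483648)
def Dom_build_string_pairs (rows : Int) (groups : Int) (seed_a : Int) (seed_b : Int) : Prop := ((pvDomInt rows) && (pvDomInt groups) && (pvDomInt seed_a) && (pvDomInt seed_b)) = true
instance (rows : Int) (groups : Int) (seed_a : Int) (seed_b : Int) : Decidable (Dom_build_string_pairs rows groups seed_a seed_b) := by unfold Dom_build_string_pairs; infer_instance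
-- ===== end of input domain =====

-- ===== PORT A =====
-- B restructures A's single interleaved loop into separate stream-generation and formatting passes (objective: alternative decomposition).
-- shared transliteration of the LCG step '(state * 1664525 + 1013904223) & 0xFFFFFFFF' (mask = mod 2^32, exact for Python's & on a 2^k-1 mask)
def pvStep (s : Int) : Int := (s * 1664525 + 1013904223) % 4294967296
-- transliteration of f"k{m:04d}": zero-pad the digits to width 4 (sign counted in the width, zeros after the sign)
def pvZfill (w : Nat) (s : List Char) : List Char := List.replicate (w - s.length) '0' ++ s
def pvKey (groups : Int) (st : Int) : String :=
  let m := PySem.Int.mod st groups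
  if m < 0 then String.mk ('k' :: '-' :: pvZfill 3 (PySem.Int.toChars (-m)))
  else String.mk ('k' :: pvZfill 4 (PySem.Int.toChars m))

-- A's loop: per row draw rng_a (key), rng_b (key), rng_a again (value)
def pvLoopA : Nat → Int → Int → Int → List String × List String × List Int
  | 0, _, _, _ => ([], [], [])
  | n+1, g, sa, sb =>
    let sa1 := pvStep sa
    let ka := pvKey g sa1
    let sb1 := pvStep sb
    let kb := pvKey g sb1
    let sa2 := pvStep sa1
    let rest := pvLoopA n g sa2 sb1
    (ka :: rest.1, kb :: rest.2.1, sa2 :: rest.2.2)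

def build_string_pairs (rows : Int) (groups : Int) (seed_a : Int) (seed_b : Int) : List String × List String × List Int :=
  pvLoopA rows.toNat groups (seed_a % 4294967296) (seed_b % 4294967296)

-- ===== PORT B =====
def pvStream : Nat → Int → List Int
  | 0, _ => []
  | n+1, s => let s1 := pvStep s; s1 :: pvStream n s1
-- transliterations of the slices xs[0::2] / xs[1::2]
def pvEvens : List Int → List Int
  | [] => []
  | [x] => [x]
  | x :: _ :: t => x :: pvEvens t
def pvOdds : List Int → List Int
  | [] => []
  | [_] => []
  | _ :: y :: t => y :: pvOdds t

def build_string_pairs_alt (rows : Int) (groups : Int) (seed_a : Int) (seed_b : Int) : List String × List String × List Int :=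
  let n := (max rows 0).toNat
  let statesA := pvStream (2 * n) (seed_a % 4294967296)
  let statesB := pvStream n (seed_b % 4294967296)
  ((pvEvens statesA).map (pvKey groups), statesB.map (pvKey groups), pvOdds statesA)

-- ===== PRECONDITION & SPEC =====
-- A raises ZeroDivisionError when rows > 0 and groups == 0 (the '% groups' in the f-string); excluded.
def Pre_build_string_pairs (rows : Int) (groups : Int) (seed_a : Int) (seed_b : Int) : Prop :=
  rows ≤ 0 ∨ groups ≠ 0
instance (rows : Int) (groups : Int) (seed_a : Int) (seed_b : Int) : Decidable (Pre_build_string_pairs rows groups seed_a seed_b) := by unfold Pre_build_string_pairs; infer_instance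
def pvWitness_build_string_pairs : Int × Int × Int × Int := (3, 7, 1, 2)
def Spec_build_string_pairs (rows : Int) (groups : Int) (seed_a : Int) (seed_b : Int) (out : List String × List String × List Int) : Prop := out = build_string_pairs_alt rows groups seed_a seed_b
instance (rows : Int) (groups : Int) (seed_a : Int) (seed_b : Int) (out : List String × List String × List Int) : Decidable (Spec_build_string_pairs rows groups seed_a seed_b out) := by unfold Spec_build_string_pairs; infer_instance

-- ===== CLAIM (what is proved, stated in full; the proofs are below) =====
def Claim_equal_build_string_pairs : Prop := ∀ (rows : Int) (groups : Int) (seed_a : Int) (seed_b : Int), Dom_build_string_pairs rows groups seed_a seed_b → Pre_build_string_pairs rows groups seed_a seed_b → Spec_build_string_pairs rows groups seed_a seed_b (build_string_pairs rows groups seed_a seed_b)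

-- ===== LEMMAS AND PROOFS =====
theorem pvLoopA_eq (n : Nat) (g sa sb : Int) :
    pvLoopA n g sa sb =
      ((pvEvens (pvStream (2 * n) sa)).map (pvKey g), (pvStream n sb).map (pvKey g),
        pvOdds (pvStream (2 * n) sa)) := by
  induction n generalizing sa sb with
  | zero => simp [pvLoopA, pvStream, pvEvens, pvOdds]
  | succ n ih =>
    have h2 : 2 * (n + 1) = 2 * n + 1 + 1 := by ring
    rw [h2]
    simp only [pvStream, pvLoopA, pvEvens, pvOdds, List.map, ih]

-- ===== VERDICT (by name: the statement is the Claim_ definition above) =====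
theorem build_string_pairs_spec : Claim_equal_build_string_pairs := by
  intro rows groups seed_a seed_b _ _
  unfold Spec_build_string_pairs build_string_pairs build_string_pairs_alt
  have hmax : (max rows 0).toNat = rows.toNat := by omega
  simp only [hmax, pvLoopA_eq]
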